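-- pv_equiv track=rewrite | github.com/Leezy-Ray/GeneType | alignment_utils.py | get_ref_segment_from_alignment
-- ===== SOURCE A (Python) =====
-- from typing import List, Tuple, Optional
--
-- def get_ref_segment_from_alignment(
--     aligned_ref: str, aligned_query: str
-- ) -> Tuple[int, int]:
--     """
--     从比对结果得到参考序列上与 query 实际重叠的区间 [ref_start, ref_end)（0-based）。
--     只取 ref 与 query 均非空位的位置（即真正比对的区间）。
--     """
--     ref_positions = []
--     ir = 0
--     for ar, aq in zip(aligned_ref, aligned_query):
--         if ar != "-" and aq != "-":
--             ref_positions.append(ir)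
--         if ar != "-":
--             ir += 1
--     if not ref_positions:
--         return 0, 0
--     return min(ref_positions), max(ref_positions) + 1
-- ===== SOURCE B (Python) =====
-- def get_ref_segment_from_alignment(aligned_ref, aligned_query):
--     """Two opposite-direction scans instead of collecting all matching ref
--     positions: forward scan finds ref_start at the first doubly-non-gap
--     column, backward scan finds ref_end from the last such column."""
--     pairs = list(zip(aligned_ref, aligned_query))
--     start = None
--     ir = 0
--     for ar, aq in pairs:
--         if ar != "-" and aq != "-":
--             start = ir
--             break
--         if ar != "-":
--             ir += 1
--     if start is None:
--         return 0, 0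
--     ir = sum(1 for ar, _ in pairs if ar != "-")
--     for ar, aq in reversed(pairs):
--         if ar != "-":
--             ir -= 1
--         if ar != "-" and aq != "-":
--             return start, ir + 1
-- ===== Notes on version B (the rewrite author's own statement) =====
-- stated objective: alternative
-- what changed: Instead of materialising the list of all matching ref positions and taking min/max over it, B finds the interval endpoints directly with two opposite-direction scans (forward scan with early exit for ref_start, backward scan over the reversed columns decrementing the non-gap counter for ref_end).
import Mathlib
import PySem

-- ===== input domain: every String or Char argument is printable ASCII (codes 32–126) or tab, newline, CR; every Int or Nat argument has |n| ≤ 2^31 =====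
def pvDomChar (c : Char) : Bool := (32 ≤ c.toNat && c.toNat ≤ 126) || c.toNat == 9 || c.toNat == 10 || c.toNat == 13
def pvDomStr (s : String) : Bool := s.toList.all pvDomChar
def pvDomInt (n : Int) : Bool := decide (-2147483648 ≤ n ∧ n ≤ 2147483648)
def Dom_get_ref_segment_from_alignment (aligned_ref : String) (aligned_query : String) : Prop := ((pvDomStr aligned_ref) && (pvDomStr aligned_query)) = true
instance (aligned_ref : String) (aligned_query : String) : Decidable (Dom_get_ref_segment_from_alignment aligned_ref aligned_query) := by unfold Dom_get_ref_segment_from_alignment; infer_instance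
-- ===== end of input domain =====

-- B replaces A's collect-all-positions-then-min/max with two opposite-direction scans
-- (forward with early exit for the start, backward over the reversed columns for the end);
-- same O(n) cost, different decomposition.

-- ===== PORT A =====
-- literal transliteration of A: one fold over zip(aligned_ref, aligned_query) carrying
-- (ref_positions, ir); then min/max of ref_positions if nonempty.
def get_ref_segment_from_alignment (aligned_ref : String) (aligned_query : String) : Int × Int :=
  let st := (aligned_ref.toList.zip aligned_query.toList).foldl
    (fun (s : List Int × Int) p =>
      let s1 := if p.1 ≠ '-' ∧ p.2 ≠ '-' then (s.1 ++ [s.2], s.2) else s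
      if p.1 ≠ '-' then (s1.1, s1.2 + 1) else s1)
    (([] : List Int), (0 : Int))
  let ref_positions := st.1
  if ref_positions = [] then (0, 0)
  else (((PySem.List.min? ref_positions (fun x => x)).getD 0),
        ((PySem.List.max? ref_positions (fun x => x)).getD 0) + 1)

-- ===== PORT B =====
-- forward scan: first column where both chars are non-gap, returning the ref index there
def pvFwd : List (Char × Char) → Int → Option Int
  | [], _ => none
  | (ar, aq) :: t, ir =>
    if ar ≠ '-' ∧ aq ≠ '-' then some ir
    else if ar ≠ '-' then pvFwd t (ir + 1) else pvFwd t ir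

-- backward scan over the reversed column list, decrementing ir past each non-gap ref column
def pvBwd : List (Char × Char) → Int → Option Int
  | [], _ => none
  | (ar, aq) :: t, ir =>
    let ir' := if ar ≠ '-' then ir - 1 else ir
    if ar ≠ '-' ∧ aq ≠ '-' then some (ir' + 1) else pvBwd t ir'

def get_ref_segment_from_alignment_alt (aligned_ref : String) (aligned_query : String) : Int × Int :=
  let pairs := aligned_ref.toList.zip aligned_query.toList
  match pvFwd pairs 0 with
  | none => (0, 0)
  | some start =>
    let total : Int := (pairs.filter (fun p => p.1 ≠ '-')).length
    match pvBwd pairs.reverse total with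
    | some e => (start, e)
    | none => (0, 0)   -- unreachable (in Python the loop always returns here); any value is fine

-- ===== PRECONDITION & SPEC =====
def Spec_get_ref_segment_from_alignment (aligned_ref : String) (aligned_query : String) (out : Int × Int) : Prop := out = get_ref_segment_from_alignment_alt aligned_ref aligned_query
instance (aligned_ref : String) (aligned_query : String) (out : Int × Int) : Decidable (Spec_get_ref_segment_from_alignment aligned_ref aligned_query out) := by unfold Spec_get_ref_segment_from_alignment; infer_instance

-- ===== CLAIM (what is proved, stated in full; the proofs are below) =====
def Claim_equal_get_ref_segment_from_alignment : Prop := ∀ (aligned_ref : String) (aligned_query : String), Dom_get_ref_segment_from_alignment aligned_ref aligned_query → Spec_get_ref_segment_from_alignment aligned_ref aligned_query (get_ref_segment_from_alignment aligned_ref aligned_query)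

-- ===== LEMMAS AND PROOFS =====

-- the list A's loop builds, written as structural recursion
def posList : List (Char × Char) → Int → List Int
  | [], _ => []
  | (ar, aq) :: t, ir =>
    (if ar ≠ '-' ∧ aq ≠ '-' then [ir] else []) ++ posList t (if ar ≠ '-' then ir + 1 else ir)

def cnt (l : List (Char × Char)) : Int := (l.filter (fun p => p.1 ≠ '-')).length

theorem cnt_cons (ar aq : Char) (t : List (Char × Char)) :
    cnt ((ar, aq) :: t) = (if ar ≠ '-' then (1 : Int) else 0) + cnt t := by
  by_cases h1 : ar = '-' <;> simp [cnt, List.filter_cons, h1] <;> push_cast <;> ring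

theorem foldl_posList (l : List (Char × Char)) (acc : List Int) (ir : Int) :
    l.foldl
      (fun (s : List Int × Int) p =>
        let s1 := if p.1 ≠ '-' ∧ p.2 ≠ '-' then (s.1 ++ [s.2], s.2) else s
        if p.1 ≠ '-' then (s1.1, s1.2 + 1) else s1)
      (acc, ir)
    = (acc ++ posList l ir, ir + cnt l) := by
  induction l generalizing acc ir with
  | nil => simp [posList, cnt]
  | cons p t ih =>
    obtain ⟨ar, aq⟩ := p
    rw [List.foldl_cons]
    have hstep :
        (let s1 := if (ar, aq).1 ≠ '-' ∧ (ar, aq).2 ≠ '-' then ((acc, ir).1 ++ [(acc, ir).2], (acc, ir).2) else (acc, ir);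
         if (ar, aq).1 ≠ '-' then (s1.1, s1.2 + 1) else s1)
        = ((if ar ≠ '-' ∧ aq ≠ '-' then acc ++ [ir] else acc),
           (if ar ≠ '-' then ir + 1 else ir)) := by
      by_cases h1 : ar = '-' <;> by_cases h2 : aq = '-' <;> simp [h1, h2]
    rw [hstep, ih]
    by_cases h1 : ar = '-' <;> by_cases h2 : aq = '-' <;>
      simp [posList, cnt_cons, h1, h2] <;> ring

theorem mem_posList_ge (l : List (Char × Char)) (ir : Int) :
    ∀ x ∈ posList l ir, ir ≤ x := by
  induction l generalizing ir with
  | nil => simp [posList]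
  | cons p t ih =>
    obtain ⟨ar, aq⟩ := p
    intro x hx
    simp only [posList, List.mem_append] at hx
    rcases hx with hx | hx
    · split_ifs at hx <;> simp_all
    · have := ih _ x hx
      split_ifs at this <;> omega

theorem posList_pairwise (l : List (Char × Char)) (ir : Int) :
    (posList l ir).Pairwise (· < ·) := by
  induction l generalizing ir with
  | nil => simp [posList]
  | cons p t ih =>
    obtain ⟨ar, aq⟩ := p
    by_cases h1 : ar = '-'
    · simpa [posList, h1] using ih ir
    · by_cases h2 : aq = '-'
      · simpa [posList, h1, h2] using ih (ir + 1)
      · have hpl : posList ((ar, aq) :: t) ir = ir :: posList t (ir + 1) := by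
          simp [posList, h1, h2]
        rw [hpl, List.pairwise_cons]
        refine ⟨fun x hx => ?_, ih (ir + 1)⟩
        have := mem_posList_ge t (ir + 1) x hx
        omega

theorem fwd_eq_head (l : List (Char × Char)) (ir : Int) :
    pvFwd l ir = (posList l ir).head? := by
  induction l generalizing ir with
  | nil => rfl
  | cons p t ih =>
    obtain ⟨ar, aq⟩ := p
    by_cases h1 : ar = '-'
    · simp [pvFwd, posList, h1, ih]
    · by_cases h2 : aq = '-' <;> simp [pvFwd, posList, h1, h2, ih]

theorem posList_append (l1 l2 : List (Char × Char)) (ir : Int) :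
    posList (l1 ++ l2) ir = posList l1 ir ++ posList l2 (ir + cnt l1) := by
  induction l1 generalizing ir with
  | nil => simp [posList, cnt]
  | cons p t ih =>
    obtain ⟨ar, aq⟩ := p
    have harg : (if ar ≠ '-' then ir + 1 else ir) + cnt t = ir + cnt ((ar, aq) :: t) := by
      rw [cnt_cons]; by_cases h1 : ar = '-' <;> simp [h1] <;> ring
    simp only [List.cons_append, posList, ih, harg, List.append_assoc]

theorem bwd_eq_getLast (l : List (Char × Char)) (ir : Int) :
    pvBwd l.reverse (ir + cnt l) = ((posList l ir).getLast?).map (· + 1) := by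
  induction l using List.reverseRecOn generalizing ir with
  | nil => simp [pvBwd, posList, cnt]
  | append_singleton t p ih =>
    obtain ⟨ar, aq⟩ := p
    have hc : cnt (t ++ [(ar, aq)]) = cnt t + (if ar ≠ '-' then (1 : Int) else 0) := by
      by_cases h1 : ar = '-' <;> simp [cnt, List.filter_append, List.filter_cons, h1]
    have hdec : (if ar ≠ '-' then ir + cnt (t ++ [(ar, aq)]) - 1 else ir + cnt (t ++ [(ar, aq)]))
        = ir + cnt t := by
      rw [hc]; by_cases h1 : ar = '-' <;> simp [h1] <;> ring
    rw [posList_append, List.reverse_append]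
    by_cases h1 : ar = '-'
    · have h1' : ¬ (ar ≠ '-' ∧ aq ≠ '-') := by simp [h1]
      simp only [List.reverse_singleton, List.singleton_append, pvBwd, if_neg h1']
      rw [show (if ar ≠ '-' then ir + cnt (t ++ [(ar, aq)]) - 1 else ir + cnt (t ++ [(ar, aq)])) = ir + cnt t from hdec]
      simpa [posList, h1] using ih ir
    · by_cases h2 : aq = '-'
      · have h1' : ¬ (ar ≠ '-' ∧ aq ≠ '-') := by simp [h2]
        simp only [List.reverse_singleton, List.singleton_append, pvBwd, if_neg h1']
        rw [show (if ar ≠ '-' then ir + cnt (t ++ [(ar, aq)]) - 1 else ir + cnt (t ++ [(ar, aq)])) = ir + cnt t from hdec]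
        simpa [posList, h1, h2] using ih ir
      · have h1' : (ar ≠ '-' ∧ aq ≠ '-') := ⟨h1, h2⟩
        simp only [List.reverse_singleton, List.singleton_append, pvBwd, if_pos h1']
        rw [show (if ar ≠ '-' then ir + cnt (t ++ [(ar, aq)]) - 1 else ir + cnt (t ++ [(ar, aq)])) = ir + cnt t from hdec]
        simp [posList, h1, h2, List.getLast?_append]

theorem foldl_min_of_le (t : List Int) (x : Int) (h : ∀ y ∈ t, x ≤ y) :
    t.foldl min x = x := by
  induction t generalizing x with
  | nil => rfl
  | cons y t ih =>
    have hxy : min x y = x := min_eq_left (h y (by simp))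
    simp only [List.foldl, hxy]
    exact ih x fun z hz => h z (by simp [hz])

theorem foldl_max_sorted (t : List Int) (x : Int) (h : (x :: t).Pairwise (· ≤ ·)) :
    t.foldl max x = (x :: t).getLast (by simp) := by
  induction t generalizing x with
  | nil => rfl
  | cons y t ih =>
    have hxy : max x y = y := max_eq_right (by rcases List.pairwise_cons.1 h with ⟨h1, _⟩; exact h1 y (by simp))
    simp only [List.foldl, hxy]
    have : (y :: t).Pairwise (· ≤ ·) := (List.pairwise_cons.1 h).2
    rw [ih y this]
    simp [List.getLast_cons]

theorem ports_eq (l : List (Char × Char)) :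
    (if posList l 0 = [] then ((0 : Int), (0 : Int))
     else ((PySem.List.min? (posList l 0) fun x => x).getD 0,
           (PySem.List.max? (posList l 0) fun x => x).getD 0 + 1))
    = (match pvFwd l 0 with
       | none => ((0 : Int), (0 : Int))
       | some start =>
         match pvBwd l.reverse (cnt l) with
         | some e => (start, e)
         | none => (0, 0)) := by
  rw [fwd_eq_head]
  have hbwd := bwd_eq_getLast l 0
  simp only [zero_add] at hbwd
  rw [hbwd]
  rcases hL : posList l 0 with _ | ⟨x, t⟩
  · simp
  · have hpw := posList_pairwise l 0
    rw [hL] at hpw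
    have hpw' : (x :: t).Pairwise (· ≤ ·) := hpw.imp le_of_lt
    have hminv : t.foldl min x = x :=
      foldl_min_of_le t x (fun y hy => (List.pairwise_cons.1 hpw').1 y hy)
    have hlast := foldl_max_sorted t x hpw'
    simp [PySem.List.min?_id_cons, PySem.List.max?_id_cons, hminv, hlast,
      List.getLast?_eq_getLast]

-- ===== VERDICT (by name: the statement is the Claim_ definition above) =====
theorem get_ref_segment_from_alignment_spec : Claim_equal_get_ref_segment_from_alignment := by
  intro r q _
  unfold Spec_get_ref_segment_from_alignment get_ref_segment_from_alignment
    get_ref_segment_from_alignment_alt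
  rw [foldl_posList]
  exact ports_eq (r.toList.zip q.toList)
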